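-- pv_equiv track=rewrite | github.com/Gnarks/TP | serie7/serie7.py | flou
-- ===== SOURCE A (Python) =====
-- from copy import deepcopy
--
-- def flou(img,r):
--     new_img = deepcopy(img)
--     total = 0
--     neighbours = []
--     for i in range(-r-1,r+1):
--         for j in range(-r-1,r+1):
--             if abs(i)+abs(j) <=2:
--                 neighbours.append((i,j))
--                 total+=1
--
--     for i in range(len(img)):
--         for j in range(len(img[i])):
--             red,green,blue = 0,0,0
--             for neighbour in neighbours:
--                 if not (i+neighbour[0] < 0 or i+neighbour[0]>len(img)-1 or j+neighbour[1] <0 or j+neighbour[1] >len(img[i])-1):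
--                     red+= img[i+neighbour[0]][j+neighbour[1]][0]
--                     green+= img[i+neighbour[0]][j+neighbour[1]][1]
--                     blue+= img[i+neighbour[0]][j+neighbour[1]][2]
--
--             new_img[i][j] = (red//total,green//total,blue//total)
--     return new_img
-- ===== SOURCE B (Python) =====
-- def _horiz(row, djs):
--     # horizontally blurred copy of one source row for the given column offsets
--     return [tuple(sum(row[j + dj][c] for dj in djs if 0 <= j + dj < len(row))
--                   for c in range(3))
--             for j in range(len(row))]
--
--
-- def flou(img, r):
--     # Separable two-stage blur: split the kernel into horizontal bands (one
--     # column-offset list per row offset), horizontally blur each contributing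
--     # source row, accumulate the blurred rows vertically, then divide once.
--     total = 0
--     bands = []  # (di, [dj, ...]) for each row offset of the kernel
--     for di in range(-r - 1, r + 1):
--         djs = [dj for dj in range(-r - 1, r + 1) if abs(di) + abs(dj) <= 2]
--         if djs:
--             bands.append((di, djs))
--             total += len(djs)
--     n = len(img)
--     out = []
--     for i, row in enumerate(img):
--         acc = [(0, 0, 0)] * len(row)
--         for di, djs in bands:
--             s = i + di
--             if 0 <= s < n:
--                 acc = [(a + x, b + y, c + z)
--                        for (a, b, c), (x, y, z) in zip(acc, _horiz(img[s], djs))]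
--         out.append([(a // total, b // total, c // total) for (a, b, c) in acc])
--     return out
-- ===== Notes on version B (the rewrite author's own statement) =====
-- stated objective: alternative
-- what changed: Replaced the gather-per-pixel loop over the full 2-D kernel by a separable two-stage blur: the kernel is split into horizontal bands (one column-offset list per row offset), each contributing source row is horizontally blurred, and the blurred rows are accumulated vertically with a zip before the final division.
-- outside the precondition, e.g. on flou([[(1, 1, 1)], []], 0): A returns [[(0, 0, 0)], []], B returns [[(0, 0, 0)], []]
import Mathlib
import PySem

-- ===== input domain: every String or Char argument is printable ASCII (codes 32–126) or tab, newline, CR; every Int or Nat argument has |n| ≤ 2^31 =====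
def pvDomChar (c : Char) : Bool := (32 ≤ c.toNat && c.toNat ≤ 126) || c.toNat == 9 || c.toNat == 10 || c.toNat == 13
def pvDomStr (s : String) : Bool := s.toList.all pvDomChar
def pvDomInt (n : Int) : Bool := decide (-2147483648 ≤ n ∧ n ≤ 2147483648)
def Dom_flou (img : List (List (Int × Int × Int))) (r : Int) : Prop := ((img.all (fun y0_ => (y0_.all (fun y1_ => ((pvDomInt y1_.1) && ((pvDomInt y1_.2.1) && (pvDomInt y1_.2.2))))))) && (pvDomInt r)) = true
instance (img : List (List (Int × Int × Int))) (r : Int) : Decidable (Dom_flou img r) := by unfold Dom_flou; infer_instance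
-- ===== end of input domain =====

-- B replaces A's per-pixel gather over the full 2-D kernel by a separable two-stage
-- blur: the kernel is split into horizontal bands, each contributing source row is
-- horizontally blurred, and the blurred rows are accumulated vertically; an
-- alternative decomposition, not claimed faster.
-- A mutates a deepcopy of its argument, never the argument itself; the equivalence is about the return value.

-- ===== PORT A =====
-- neighbours/total builder: the first pair of nested loops in A
def flouKernel (r : Int) : List (Int × Int) × Int :=
  (PySem.List.pyRange (-r-1) (r+1) 1).foldl (fun st i =>
    (PySem.List.pyRange (-r-1) (r+1) 1).foldl (fun st j =>
      if |i| + |j| ≤ 2 then (st.1 ++ [(i, j)], st.2 + 1) else st) st) ([], 0)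

-- A overwrites every cell of the deepcopy, so the i/j assignment loops are the mapIdx over img;
-- the inner neighbour loop is the foldl over the red/green/blue accumulators.
def flou (img : List (List (Int × Int × Int))) (r : Int) : List (List (Int × Int × Int)) :=
  let nt := flouKernel r
  img.mapIdx (fun i row => row.mapIdx (fun j _ =>
    let s := nt.1.foldl (fun (acc : Int × Int × Int) nb =>
      if ¬((i : Int) + nb.1 < 0 ∨ (i : Int) + nb.1 > (img.length : Int) - 1 ∨
            (j : Int) + nb.2 < 0 ∨ (j : Int) + nb.2 > (row.length : Int) - 1) then
        -- in-range under Pre_: the getD defaults are never taken there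
        let px := (PySem.List.pyGet? ((PySem.List.pyGet? img ((i : Int) + nb.1)).getD []) ((j : Int) + nb.2)).getD (0, 0, 0)
        (acc.1 + px.1, acc.2.1 + px.2.1, acc.2.2 + px.2.2)
      else acc) ((0 : Int), (0 : Int), (0 : Int))
    (PySem.Int.floordiv s.1 nt.2, PySem.Int.floordiv s.2.1 nt.2, PySem.Int.floordiv s.2.2 nt.2)))

-- ===== PORT B =====
-- Source B's _horiz: horizontally blurred copy of one source row (three per-channel sums)
def flouHoriz (row : List (Int × Int × Int)) (djs : List Int) : List (Int × Int × Int) :=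
  row.mapIdx (fun j _ =>
    (djs.foldl (fun s dj => if 0 ≤ (j : Int) + dj ∧ (j : Int) + dj < (row.length : Int)
        then s + ((PySem.List.pyGet? row ((j : Int) + dj)).getD (0, 0, 0)).1 else s) 0,
     djs.foldl (fun s dj => if 0 ≤ (j : Int) + dj ∧ (j : Int) + dj < (row.length : Int)
        then s + ((PySem.List.pyGet? row ((j : Int) + dj)).getD (0, 0, 0)).2.1 else s) 0,
     djs.foldl (fun s dj => if 0 ≤ (j : Int) + dj ∧ (j : Int) + dj < (row.length : Int)
        then s + ((PySem.List.pyGet? row ((j : Int) + dj)).getD (0, 0, 0)).2.2 else s) 0))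

-- Source B's band builder: one column-offset list per row offset, plus the kernel size
def flouBands (r : Int) : List (Int × List Int) × Int :=
  (PySem.List.pyRange (-r-1) (r+1) 1).foldl (fun st di =>
    let djs := (PySem.List.pyRange (-r-1) (r+1) 1).filter (fun dj => decide (|di| + |dj| ≤ 2))
    if djs.isEmpty then st else (st.1 ++ [(di, djs)], st.2 + (djs.length : Int))) ([], 0)

-- Source B's main loop: accumulate horizontally blurred source rows vertically, then divide
def flou_alt (img : List (List (Int × Int × Int))) (r : Int) : List (List (Int × Int × Int)) :=
  let bt := flouBands r
  img.mapIdx (fun i row =>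
    let acc := bt.1.foldl (fun acc (b : Int × List Int) =>
      if 0 ≤ (i : Int) + b.1 ∧ (i : Int) + b.1 < (img.length : Int) then
        List.zipWith (fun (a p : Int × Int × Int) => (a.1 + p.1, a.2.1 + p.2.1, a.2.2 + p.2.2))
          acc (flouHoriz ((PySem.List.pyGet? img ((i : Int) + b.1)).getD []) b.2)
      else acc) (List.replicate row.length ((0, 0, 0) : Int × Int × Int))
    acc.map (fun p => (PySem.Int.floordiv p.1 bt.2, PySem.Int.floordiv p.2.1 bt.2, PySem.Int.floordiv p.2.2 bt.2)))

-- ===== PRECONDITION & SPEC =====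
-- Pre_ excludes inputs on which Python A raises: negative r with a nonempty row
-- (total = 0 → ZeroDivisionError) and ragged images (A checks columns against the
-- CURRENT row's length but reads a NEIGHBOURING row → IndexError); rectangularity
-- also excludes some ragged images on which A happens to return (e.g. r = 0 with
-- non-increasing row lengths) — B returns the same values there, see the cites.
def Pre_flou (img : List (List (Int × Int × Int))) (r : Int) : Prop :=
  (0 ≤ r ∧ ∀ row ∈ img, row.length = (img.headD []).length) ∨ (∀ row ∈ img, row = [])
instance (img : List (List (Int × Int × Int))) (r : Int) : Decidable (Pre_flou img r) := by
  unfold Pre_flou; infer_instance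

def pvWitness_flou : (List (List (Int × Int × Int))) × Int :=
  ([[(1, 2, 3), (4, 5, 6)], [(7, 8, 9), (10, 11, 12)]], 1)

def Spec_flou (img : List (List (Int × Int × Int))) (r : Int) (out : List (List (Int × Int × Int))) : Prop := out = flou_alt img r
instance (img : List (List (Int × Int × Int))) (r : Int) (out : List (List (Int × Int × Int))) : Decidable (Spec_flou img r out) := by unfold Spec_flou; infer_instance

-- ===== CLAIM (what is proved, stated in full; the proofs are below) =====
def Claim_equal_flou : Prop := ∀ (img : List (List (Int × Int × Int))) (r : Int), Dom_flou img r → Pre_flou img r → Spec_flou img r (flou img r)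

-- ===== LEMMAS AND PROOFS =====

-- composing two indexed maps
theorem pv_mapIdx_mapIdx {α β γ : Type} (f : Nat → α → β) (g : Nat → β → γ) (l : List α) :
    (l.mapIdx f).mapIdx g = l.mapIdx (fun i x => g i (f i x)) := by
  apply List.ext_getElem (by simp)
  intro i h1 h2
  simp

-- flatten of the band list back into A's pair list
def pvFlat (bs : List (Int × List Int)) : List (Int × Int) :=
  bs.flatMap (fun b => b.2.map (fun dj => (b.1, dj)))

-- A's inner append loop for one fixed row offset
theorem pv_inner_fold (i : Int) : ∀ (L : List Int) (st : List (Int × Int) × Int),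
    L.foldl (fun st j => if |i| + |j| ≤ 2 then (st.1 ++ [(i, j)], st.2 + 1) else st) st
    = (st.1 ++ (L.filter (fun j => decide (|i| + |j| ≤ 2))).map (fun j => (i, j)),
       st.2 + ((L.filter (fun j => decide (|i| + |j| ≤ 2))).length : Int)) := by
  intro L
  induction L with
  | nil => intro st; simp
  | cons j L ih =>
      intro st
      by_cases h : |i| + |j| ≤ 2
      · simp only [List.foldl_cons, if_pos h, ih, List.filter_cons, decide_eq_true h]
        simp
        omega
      · simp only [List.foldl_cons, if_neg h, ih, List.filter_cons]
        simp [h]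

-- A's kernel loop and B's band loop build the same flat offset list and the same total
theorem pv_fold_inv (R : List Int) : ∀ (L : List Int) (bs : List (Int × List Int)) (t : Int),
    L.foldl (fun st i => R.foldl (fun st j =>
        if |i| + |j| ≤ 2 then (st.1 ++ [(i, j)], st.2 + 1) else st) st) (pvFlat bs, t)
    = (pvFlat (L.foldl (fun st di =>
          let djs := R.filter (fun dj => decide (|di| + |dj| ≤ 2))
          if djs.isEmpty then st else (st.1 ++ [(di, djs)], st.2 + (djs.length : Int))) (bs, t)).1,
       (L.foldl (fun st di =>
          let djs := R.filter (fun dj => decide (|di| + |dj| ≤ 2))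
          if djs.isEmpty then st else (st.1 ++ [(di, djs)], st.2 + (djs.length : Int))) (bs, t)).2) := by
  intro L
  induction L with
  | nil => intro bs t; simp
  | cons i L ih =>
      intro bs t
      rw [List.foldl_cons, pv_inner_fold i R (pvFlat bs, t)]
      by_cases h : (R.filter (fun dj => decide (|i| + |dj| ≤ 2))).isEmpty
      · have he : R.filter (fun dj => decide (|i| + |dj| ≤ 2)) = [] := List.isEmpty_iff.mp h
        rw [List.foldl_cons]
        simp only [he, List.map_nil, List.append_nil, List.length_nil, Nat.cast_zero, add_zero,
          List.isEmpty_nil, if_pos]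
        exact ih bs t
      · rw [List.foldl_cons]
        simp only [h, Bool.false_eq_true, if_false]
        have : pvFlat bs ++ (R.filter (fun j => decide (|i| + |j| ≤ 2))).map (fun j => (i, j))
            = pvFlat (bs ++ [(i, R.filter (fun dj => decide (|i| + |dj| ≤ 2)))]) := by
          simp [pvFlat]
        rw [this]
        exact ih (bs ++ [(i, R.filter (fun dj => decide (|i| + |dj| ≤ 2)))]) (t + _)

theorem pv_kernel_bands (r : Int) :
    flouKernel r = (pvFlat (flouBands r).1, (flouBands r).2) := by
  have h := pv_fold_inv (PySem.List.pyRange (-r-1) (r+1) 1)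
      (PySem.List.pyRange (-r-1) (r+1) 1) [] 0
  simpa [flouKernel, flouBands, pvFlat] using h

-- shifting a conditional-add fold off its initial accumulator
theorem pv_foldl_if_add {α : Type} (p : α → Prop) [DecidablePred p] (f : α → Int) :
    ∀ (L : List α) (a : Int),
      L.foldl (fun s x => if p x then s + f x else s) a
      = a + L.foldl (fun s x => if p x then s + f x else s) 0 := by
  intro L
  induction L with
  | nil => intro a; simp
  | cons x L ih =>
      intro a
      by_cases h : p x
      · simp only [List.foldl_cons, if_pos h, zero_add]
        rw [ih (a + f x), ih (f x)]
        ring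
      · simp only [List.foldl_cons, if_neg h, ih a]

-- a conditional triple-add fold splits into three scalar folds
theorem pv_triple_fold {α : Type} (p : α → Prop) [DecidablePred p] (f1 f2 f3 : α → Int) :
    ∀ (L : List α) (v : Int × Int × Int),
      L.foldl (fun v x => if p x then (v.1 + f1 x, v.2.1 + f2 x, v.2.2 + f3 x) else v) v
      = (v.1 + L.foldl (fun s x => if p x then s + f1 x else s) 0,
         v.2.1 + L.foldl (fun s x => if p x then s + f2 x else s) 0,
         v.2.2 + L.foldl (fun s x => if p x then s + f3 x else s) 0) := by
  intro L
  induction L with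
  | nil => intro v; simp
  | cons x L ih =>
      intro v
      by_cases h : p x
      · simp only [List.foldl_cons, if_pos h, ih, zero_add]
        rw [pv_foldl_if_add p f1 L (f1 x), pv_foldl_if_add p f2 L (f2 x),
            pv_foldl_if_add p f3 L (f3 x)]
        refine Prod.ext (by ring) (Prod.ext (by ring) (by ring))
      · simp only [List.foldl_cons, if_neg h, ih]

-- folding over a flatMap is the nested fold
theorem pv_foldl_flatMap {α β σ : Type} (g : α → List β) (f : σ → β → σ) :
    ∀ (L : List α) (s : σ), (L.flatMap g).foldl f s = L.foldl (fun s a => (g a).foldl f s) s := by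
  intro L
  induction L with
  | nil => intro s; simp
  | cons a L ih => intro s; simp [List.foldl_append, ih]

-- the value flouHoriz puts at column j of source row src
def pvHval (src : List (Int × Int × Int)) (j : Nat) (djs : List Int) : Int × Int × Int :=
  (djs.foldl (fun s dj => if 0 ≤ (j : Int) + dj ∧ (j : Int) + dj < (src.length : Int)
      then s + ((PySem.List.pyGet? src ((j : Int) + dj)).getD (0, 0, 0)).1 else s) 0,
   djs.foldl (fun s dj => if 0 ≤ (j : Int) + dj ∧ (j : Int) + dj < (src.length : Int)
      then s + ((PySem.List.pyGet? src ((j : Int) + dj)).getD (0, 0, 0)).2.1 else s) 0,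
   djs.foldl (fun s dj => if 0 ≤ (j : Int) + dj ∧ (j : Int) + dj < (src.length : Int)
      then s + ((PySem.List.pyGet? src ((j : Int) + dj)).getD (0, 0, 0)).2.2 else s) 0)

-- per-cell effect of one band on pixel (i, j)
def pvBCell (img : List (List (Int × Int × Int))) (i j : Nat)
    (v : Int × Int × Int) (b : Int × List Int) : Int × Int × Int :=
  if 0 ≤ (i : Int) + b.1 ∧ (i : Int) + b.1 < (img.length : Int) then
    let h := pvHval ((PySem.List.pyGet? img ((i : Int) + b.1)).getD []) j b.2
    (v.1 + h.1, v.2.1 + h.2.1, v.2.2 + h.2.2)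
  else v

theorem pv_horiz_getElem (src : List (Int × Int × Int)) (djs : List Int) (j : Nat)
    (hj : j < src.length) :
    (flouHoriz src djs)[j]'(by simpa [flouHoriz] using hj) = pvHval src j djs := by
  simp [flouHoriz, pvHval]

-- B's zip-accumulate fold, pointwise
theorem pv_bands_fold (img : List (List (Int × Int × Int))) (W : Nat)
    (hW : ∀ row ∈ img, row.length = W) (i : Nat) :
    ∀ (bs : List (Int × List Int)) (acc : List (Int × Int × Int)), acc.length = W →
      bs.foldl (fun acc (b : Int × List Int) =>
        if 0 ≤ (i : Int) + b.1 ∧ (i : Int) + b.1 < (img.length : Int) then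
          List.zipWith (fun (a p : Int × Int × Int) => (a.1 + p.1, a.2.1 + p.2.1, a.2.2 + p.2.2))
            acc (flouHoriz ((PySem.List.pyGet? img ((i : Int) + b.1)).getD []) b.2)
        else acc) acc
      = acc.mapIdx (fun j v => bs.foldl (pvBCell img i j) v) := by
  intro bs
  induction bs with
  | nil =>
      intro acc _
      apply List.ext_getElem (by simp)
      intro j h1 h2
      simp
  | cons b bs ih =>
      intro acc hacc
      by_cases hb : 0 ≤ (i : Int) + b.1 ∧ (i : Int) + b.1 < (img.length : Int)
      · have hsrc : ((PySem.List.pyGet? img ((i : Int) + b.1)).getD []).length = W := by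
          obtain ⟨h0, h1⟩ := hb
          have hk : ((i : Int) + b.1) = (((i : Int) + b.1).toNat : Int) := by omega
          have hlt : ((i : Int) + b.1).toNat < img.length := by omega
          rw [hk, PySem.List.pyGet?_natCast, List.getElem?_eq_getElem hlt]
          exact hW _ (List.getElem_mem hlt)
        have hstep : List.zipWith (fun (a p : Int × Int × Int) => (a.1 + p.1, a.2.1 + p.2.1, a.2.2 + p.2.2))
            acc (flouHoriz ((PySem.List.pyGet? img ((i : Int) + b.1)).getD []) b.2)
            = acc.mapIdx (fun j v => pvBCell img i j v b) := by
          apply List.ext_getElem (by simp [flouHoriz, hsrc, hacc])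
          intro j h1 h2
          have hjW : j < W := by simpa [flouHoriz, hsrc, hacc] using h1
          rw [List.getElem_zipWith, List.getElem_mapIdx]
          rw [pv_horiz_getElem _ _ _ (by omega : j < ((PySem.List.pyGet? img ((i : Int) + b.1)).getD []).length)]
          simp [pvBCell, hb]
        rw [List.foldl_cons, if_pos hb, hstep, ih _ (by simp [hacc]), pv_mapIdx_mapIdx]
        simp only [List.foldl_cons]
      · rw [List.foldl_cons, if_neg hb, ih acc hacc]
        simp only [List.foldl_cons, pvBCell, if_neg hb]

-- a fold whose step ignores the element
theorem pv_foldl_id {α σ : Type} (L : List α) (v : σ) :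
    L.foldl (fun v _ => v) v = v := by
  induction L with
  | nil => rfl
  | cons a L ih => simp only [List.foldl_cons]; exact ih

-- the source row fetched for an in-range row offset has the common width
theorem pv_src_len (img : List (List (Int × Int × Int))) (W : Nat)
    (hW : ∀ row ∈ img, row.length = W) (s : Int)
    (hb : 0 ≤ s ∧ s < (img.length : Int)) :
    ((PySem.List.pyGet? img s).getD []).length = W := by
  obtain ⟨h0, h1⟩ := hb
  have hk : s = ((s.toNat : Nat) : Int) := by omega
  have hlt : s.toNat < img.length := by omega
  rw [hk, PySem.List.pyGet?_natCast, List.getElem?_eq_getElem hlt]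
  exact hW _ (List.getElem_mem hlt)

-- one band of B equals A's fold over that band's flattened offset pairs
theorem pv_band_one (img : List (List (Int × Int × Int))) (W : Nat)
    (hW : ∀ row ∈ img, row.length = W) (i j : Nat) (b : Int × List Int)
    (v : Int × Int × Int) :
    (b.2.map (fun dj => (b.1, dj))).foldl (fun (acc : Int × Int × Int) nb =>
      if ¬((i : Int) + nb.1 < 0 ∨ (i : Int) + nb.1 > (img.length : Int) - 1 ∨
            (j : Int) + nb.2 < 0 ∨ (j : Int) + nb.2 > (W : Int) - 1) then
        let px := (PySem.List.pyGet? ((PySem.List.pyGet? img ((i : Int) + nb.1)).getD []) ((j : Int) + nb.2)).getD (0, 0, 0)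
        (acc.1 + px.1, acc.2.1 + px.2.1, acc.2.2 + px.2.2)
      else acc) v
    = pvBCell img i j v b := by
  rw [List.foldl_map]
  by_cases hb : 0 ≤ (i : Int) + b.1 ∧ (i : Int) + b.1 < (img.length : Int)
  · have hsrc : ((PySem.List.pyGet? img ((i : Int) + b.1)).getD []).length = W :=
      pv_src_len img W hW _ hb
    have hfun : (fun (acc : Int × Int × Int) (dj : Int) =>
        if ¬((i : Int) + b.1 < 0 ∨ (i : Int) + b.1 > (img.length : Int) - 1 ∨
              (j : Int) + dj < 0 ∨ (j : Int) + dj > (W : Int) - 1) then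
          let px := (PySem.List.pyGet? ((PySem.List.pyGet? img ((i : Int) + b.1)).getD []) ((j : Int) + dj)).getD (0, 0, 0)
          (acc.1 + px.1, acc.2.1 + px.2.1, acc.2.2 + px.2.2)
        else acc)
        = (fun (acc : Int × Int × Int) (dj : Int) =>
        if 0 ≤ (j : Int) + dj ∧ (j : Int) + dj < ((((PySem.List.pyGet? img ((i : Int) + b.1)).getD []).length : Nat) : Int) then
          (acc.1 + ((PySem.List.pyGet? ((PySem.List.pyGet? img ((i : Int) + b.1)).getD []) ((j : Int) + dj)).getD (0, 0, 0)).1,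
           acc.2.1 + ((PySem.List.pyGet? ((PySem.List.pyGet? img ((i : Int) + b.1)).getD []) ((j : Int) + dj)).getD (0, 0, 0)).2.1,
           acc.2.2 + ((PySem.List.pyGet? ((PySem.List.pyGet? img ((i : Int) + b.1)).getD []) ((j : Int) + dj)).getD (0, 0, 0)).2.2)
        else acc) := by
      funext acc dj
      rw [hsrc]
      by_cases hc : 0 ≤ (j : Int) + dj ∧ (j : Int) + dj < (W : Int)
      · rw [if_pos hc, if_pos (by omega)]
      · rw [if_neg hc, if_neg (by omega)]
    rw [hfun,
      pv_triple_fold (fun dj => 0 ≤ (j : Int) + dj ∧ (j : Int) + dj < ((((PySem.List.pyGet? img ((i : Int) + b.1)).getD []).length : Nat) : Int))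
        (fun dj => ((PySem.List.pyGet? ((PySem.List.pyGet? img ((i : Int) + b.1)).getD []) ((j : Int) + dj)).getD (0, 0, 0)).1)
        (fun dj => ((PySem.List.pyGet? ((PySem.List.pyGet? img ((i : Int) + b.1)).getD []) ((j : Int) + dj)).getD (0, 0, 0)).2.1)
        (fun dj => ((PySem.List.pyGet? ((PySem.List.pyGet? img ((i : Int) + b.1)).getD []) ((j : Int) + dj)).getD (0, 0, 0)).2.2)]
    simp only [pvBCell, if_pos hb, pvHval]
  · have hfun : (fun (acc : Int × Int × Int) (dj : Int) =>
        if ¬((i : Int) + b.1 < 0 ∨ (i : Int) + b.1 > (img.length : Int) - 1 ∨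
              (j : Int) + dj < 0 ∨ (j : Int) + dj > (W : Int) - 1) then
          let px := (PySem.List.pyGet? ((PySem.List.pyGet? img ((i : Int) + b.1)).getD []) ((j : Int) + dj)).getD (0, 0, 0)
          (acc.1 + px.1, acc.2.1 + px.2.1, acc.2.2 + px.2.2)
        else acc)
        = (fun (acc : Int × Int × Int) (_ : Int) => acc) := by
      funext acc dj
      rw [if_neg (by omega)]
    rw [hfun, pv_foldl_id]
    simp only [pvBCell, if_neg hb]

-- A's whole kernel fold at pixel (i, j) equals B's band fold there
theorem pv_pixel (img : List (List (Int × Int × Int))) (W : Nat)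
    (hW : ∀ row ∈ img, row.length = W) (i j : Nat)
    (bs : List (Int × List Int)) (v : Int × Int × Int) :
    (pvFlat bs).foldl (fun (acc : Int × Int × Int) nb =>
      if ¬((i : Int) + nb.1 < 0 ∨ (i : Int) + nb.1 > (img.length : Int) - 1 ∨
            (j : Int) + nb.2 < 0 ∨ (j : Int) + nb.2 > (W : Int) - 1) then
        let px := (PySem.List.pyGet? ((PySem.List.pyGet? img ((i : Int) + nb.1)).getD []) ((j : Int) + nb.2)).getD (0, 0, 0)
        (acc.1 + px.1, acc.2.1 + px.2.1, acc.2.2 + px.2.2)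
      else acc) v
    = bs.foldl (pvBCell img i j) v := by
  rw [pvFlat, pv_foldl_flatMap]
  have hfun : (fun (v : Int × Int × Int) (b : Int × List Int) =>
      ((fun (b : Int × List Int) => b.2.map (fun dj => (b.1, dj))) b).foldl (fun (acc : Int × Int × Int) nb =>
        if ¬((i : Int) + nb.1 < 0 ∨ (i : Int) + nb.1 > (img.length : Int) - 1 ∨
              (j : Int) + nb.2 < 0 ∨ (j : Int) + nb.2 > (W : Int) - 1) then
          let px := (PySem.List.pyGet? ((PySem.List.pyGet? img ((i : Int) + nb.1)).getD []) ((j : Int) + nb.2)).getD (0, 0, 0)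
          (acc.1 + px.1, acc.2.1 + px.2.1, acc.2.2 + px.2.2)
        else acc) v)
      = pvBCell img i j := by
    funext v b
    exact pv_band_one img W hW i j b v
  rw [hfun]

-- B's accumulator fold starting from the empty row stays empty
theorem pv_fold_nil_acc (img : List (List (Int × Int × Int))) (i : Nat)
    (bs : List (Int × List Int)) :
    bs.foldl (fun acc (b : Int × List Int) =>
      if 0 ≤ (i : Int) + b.1 ∧ (i : Int) + b.1 < (img.length : Int) then
        List.zipWith (fun (a p : Int × Int × Int) => (a.1 + p.1, a.2.1 + p.2.1, a.2.2 + p.2.2))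
          acc (flouHoriz ((PySem.List.pyGet? img ((i : Int) + b.1)).getD []) b.2)
      else acc) []
    = [] := by
  induction bs with
  | nil => rfl
  | cons b bs ih =>
      rw [List.foldl_cons]
      split
      · simpa using ih
      · exact ih

-- the two ports agree on every input admitted by Pre_
theorem pv_ports_eq (img : List (List (Int × Int × Int))) (r : Int)
    (h : Pre_flou img r) : flou img r = flou_alt img r := by
  simp only [flou, flou_alt, pv_kernel_bands]
  rcases h with ⟨_, hrect⟩ | hemp
  · apply List.ext_getElem (by simp)
    intro i h1 h2
    have hi : i < img.length := by simpa using h1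
    have hrowW : (img[i]'hi).length = (img.headD []).length :=
      hrect _ (List.getElem_mem hi)
    simp only [List.getElem_mapIdx]
    rw [pv_bands_fold img (img.headD []).length hrect i (flouBands r).1 (List.replicate (img[i]'hi).length ((0, 0, 0) : Int × Int × Int)) (by simp [hrowW])]
    apply List.ext_getElem (by simp)
    intro j hj1 hj2
    simp only [List.getElem_mapIdx, List.getElem_map, List.getElem_replicate]
    rw [hrowW, pv_pixel img (img.headD []).length hrect i j]
  · apply List.ext_getElem (by simp)
    intro i h1 h2
    have hi : i < img.length := by simpa using h1
    have hrow : img[i]'hi = [] := hemp _ (List.getElem_mem hi)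
    simp only [List.getElem_mapIdx, hrow, List.mapIdx_nil, List.length_nil,
      List.replicate_zero, pv_fold_nil_acc, List.map_nil]

-- ===== VERDICT (by name: the statement is the Claim_ definition above) =====
theorem flou_spec : Claim_equal_flou := by
  intro img r _ hpre
  unfold Spec_flou
  exact pv_ports_eq img r hpre
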